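-- pv_equiv track=rewrite | github.com/Techbarsha/GFG-POTD | October/19 October 2024 Nearest multiple of 10.py | roundToNearest
-- ===== SOURCE A (Python) =====
-- def roundToNearest(str_num: str) -> str:
--     #Complete the function
--     str_num = list(str_num)
--     n = len(str_num)
--
--     if str_num[n-1] <= '5':
--         str_num[n-1] = '0'
--         return ''.join(str_num)
--
--     str_num[n-1] = '0'
--     i = n - 2
--
--     while i >= 0 and str_num[i] == '9':
--         str_num[i] = '0'
--         i -= 1
--
--     if i < 0:
--         str_num.insert(0, '1')
--     else:
--         str_num[i] = chr(ord(str_num[i]) + 1)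
--
--     return ''.join(str_num)
-- ===== SOURCE B (Python) =====
-- def _bump(s: str) -> str:
--     # add 1 to the string's last character, propagating '9' -> '0' carries leftward
--     if not s:
--         return '1'
--     if s[-1] == '9':
--         return _bump(s[:-1]) + '0'
--     return s[:-1] + chr(ord(s[-1]) + 1)
--
-- def roundToNearest(str_num: str) -> str:
--     if str_num[-1] <= '5':
--         return str_num[:-1] + '0'
--     return _bump(str_num[:-1]) + '0'
-- ===== Notes on version B (the rewrite author's own statement) =====
-- stated objective: simpler
-- what changed: A's in-place digit array with an index-based carry while-loop is replaced by a short recursive helper that increments a string's last character via slicing ('9' recurses on s[:-1]), so no indices or mutation remain.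
import Mathlib
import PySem

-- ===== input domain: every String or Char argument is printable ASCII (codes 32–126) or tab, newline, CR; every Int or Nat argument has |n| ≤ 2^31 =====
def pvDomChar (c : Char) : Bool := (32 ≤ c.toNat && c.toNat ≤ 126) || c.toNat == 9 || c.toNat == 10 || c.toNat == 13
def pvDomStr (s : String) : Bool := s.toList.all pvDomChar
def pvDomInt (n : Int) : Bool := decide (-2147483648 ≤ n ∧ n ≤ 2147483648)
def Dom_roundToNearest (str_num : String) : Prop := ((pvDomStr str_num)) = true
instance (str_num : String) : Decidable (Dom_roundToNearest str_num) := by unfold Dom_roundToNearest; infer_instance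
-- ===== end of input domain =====

-- B replaces A's in-place index/carry while-loop by slicing recursion (a helper that adds one
-- to the last character with '9'→'0' carries); objective: simpler, no speed claim.

-- ===== PORT A =====
-- A's while loop: i counts down while str_num[i] == '9', zeroing; then insert '1' or bump str_num[i].
def pyCarry (l : List Char) (i : Int) : List Char :=
  if _h : 0 ≤ i ∧ PySem.List.pyGet? l i = some '9' then
    pyCarry (l.set i.toNat '0') (i - 1)
  else if i < 0 then
    '1' :: l          -- str_num.insert(0, '1')
  else
    match PySem.List.pyGet? l i with
    | some c => l.set i.toNat (Char.ofNat (c.toNat + 1))   -- chr(ord(c)+1)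
    | none => l       -- unreachable: 0 ≤ i < len here
termination_by (i + 1).toNat
decreasing_by omega

def roundToNearest (str_num : String) : String :=
  match PySem.List.pyGet? str_num.toList ((str_num.toList.length : Int) - 1) with
  | none => ""        -- str_num[n-1] raises IndexError on "" (excluded by Pre_)
  | some c =>
    if c ≤ '5' then String.ofList (str_num.toList.set ((str_num.toList.length : Int) - 1).toNat '0')
    else String.ofList (pyCarry (str_num.toList.set ((str_num.toList.length : Int) - 1).toNat '0')
                                ((str_num.toList.length : Int) - 2))

-- ===== PORT B =====
-- _bump from Source B; s[:-1] is List.dropLast (exact), s[-1] on the nonempty list is getLast.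
def bumpAlt (l : List Char) : List Char :=
  if h : l = [] then ['1']
  else if l.getLast h = '9' then bumpAlt l.dropLast ++ ['0']
  else l.dropLast ++ [Char.ofNat ((l.getLast h).toNat + 1)]
termination_by l.length
decreasing_by simp [List.length_dropLast]; exact List.length_pos_iff.mpr h

def roundToNearest_alt (str_num : String) : String :=
  match str_num.toList.getLast? with
  | none => ""        -- str_num[-1] raises IndexError on "" (excluded by Pre_)
  | some c =>
    if c ≤ '5' then String.ofList (str_num.toList.dropLast ++ ['0'])
    else String.ofList (bumpAlt str_num.toList.dropLast ++ ['0'])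

-- ===== PRECONDITION & SPEC =====
-- Pre_ excludes only the empty string, on which both Pythons raise IndexError.
def Pre_roundToNearest (str_num : String) : Prop := str_num ≠ ""
instance (str_num : String) : Decidable (Pre_roundToNearest str_num) := by unfold Pre_roundToNearest; infer_instance
def pvWitness_roundToNearest : String := "18"

def Spec_roundToNearest (str_num : String) (out : String) : Prop := out = roundToNearest_alt str_num
instance (str_num : String) (out : String) : Decidable (Spec_roundToNearest str_num out) := by unfold Spec_roundToNearest; infer_instance

-- ===== CLAIM (what is proved, stated in full; the proofs are below) =====
def Claim_equal_roundToNearest : Prop := ∀ (str_num : String), Dom_roundToNearest str_num → Pre_roundToNearest str_num → Spec_roundToNearest str_num (roundToNearest str_num)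

-- ===== LEMMAS AND PROOFS =====

-- setting the last position of a nonempty list
lemma set_last_eq (l : List Char) (c : Char) (h : l ≠ []) :
    l.set (l.length - 1) c = l.dropLast ++ [c] := by
  induction l with
  | nil => exact absurd rfl h
  | cons a t ih =>
    cases t with
    | nil => rfl
    | cons b u =>
      simp only [List.length_cons, Nat.add_sub_cancel, List.set_cons_succ,
        List.dropLast_cons_of_ne_nil (by simp : b :: u ≠ []), List.cons_append]
      have := ih (by simp)
      simpa using this

lemma pyGet?_mid (init : List Char) (c : Char) (tail : List Char) :
    PySem.List.pyGet? (init ++ c :: tail) (init.length : Int) = some c := by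
  simpa using PySem.List.pyGet?_append_length (pre := init) (y := c) (ys := tail)

lemma set_mid (init : List Char) (c x : Char) (tail : List Char) :
    (init ++ c :: tail).set init.length x = init ++ x :: tail := by
  induction init with
  | nil => rfl
  | cons a t ih => simp [ih]

-- bumpAlt, read off one right-hand element
lemma bumpAlt_concat (init : List Char) (c : Char) :
    bumpAlt (init ++ [c]) =
      if c = '9' then bumpAlt init ++ ['0'] else init ++ [Char.ofNat (c.toNat + 1)] := by
  rw [bumpAlt, dif_neg (by simp : ¬ (init ++ [c] = []))]
  simp

-- the core correspondence: A's carry loop over body++tail starting at the end of body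
-- equals B's recursive bump of body (tail is untouched)
lemma carry_eq (body : List Char) : ∀ (tail : List Char),
    pyCarry (body ++ tail) ((body.length : Int) - 1) = bumpAlt body ++ tail := by
  induction body using List.reverseRecOn with
  | nil =>
    intro tail
    rw [pyCarry, bumpAlt]
    norm_num
  | append_singleton init c ih =>
    intro tail
    have hlen : ((init ++ [c]).length : Int) - 1 = (init.length : Int) := by simp
    have hget : PySem.List.pyGet? ((init ++ [c]) ++ tail) (init.length : Int) = some c := by
      simpa using pyGet?_mid init c tail
    have hset : ∀ x : Char, ((init ++ [c]) ++ tail).set init.length x = init ++ x :: tail := by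
      intro x; simpa using set_mid init c x tail
    have htn : ((init.length : Int)).toNat = init.length := by simp
    rw [hlen, pyCarry, bumpAlt_concat]
    by_cases hc : c = '9'
    · rw [dif_pos ⟨by omega, by rw [hget, hc]⟩, htn, hset '0']
      have : pyCarry (init ++ '0' :: tail) ((init.length : Int) - 1)
           = bumpAlt init ++ '0' :: tail := by simpa using ih ('0' :: tail)
      rw [this, if_pos hc]
      simp
    · rw [dif_neg (by rw [hget]; simp [hc]),
        if_neg (by omega : ¬ ((init.length : Int) < 0)), hget]
      show (init ++ [c] ++ tail).set ((init.length : Int)).toNat (Char.ofNat (c.toNat + 1)) = _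
      rw [htn, hset, if_neg hc]
      simp

lemma toList_ne_nil (s : String) (h : s ≠ "") : s.toList ≠ [] := by
  intro hn
  have := String.toList_inj (s₁ := s) (s₂ := "")
  simp_all

-- ===== VERDICT (by name: the statement is the Claim_ definition above) =====
theorem roundToNearest_spec : Claim_equal_roundToNearest := by
  intro s _ hpre
  unfold Spec_roundToNearest roundToNearest roundToNearest_alt
  have hne : s.toList ≠ [] := toList_ne_nil s hpre
  set l := s.toList with hl
  have hlen : 1 ≤ l.length := List.length_pos_iff.mpr hne
  have htoNat : ((l.length : Int) - 1).toNat = l.length - 1 := by omega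
  have hget : PySem.List.pyGet? l ((l.length : Int) - 1) = l.getLast? := by
    rw [PySem.List.pyGet?_of_nonneg l (by omega), htoNat, List.getLast?_eq_getElem?]
  obtain ⟨c, hc⟩ := Option.ne_none_iff_exists'.mp
    (by simpa [List.getLast?_eq_none_iff] using hne : l.getLast? ≠ none)
  have hsetl : ∀ x : Char, l.set ((l.length : Int) - 1).toNat x = l.dropLast ++ [x] := by
    intro x; rw [htoNat]; exact set_last_eq l x hne
  rw [hget, hc]
  by_cases h5 : c ≤ '5'
  · simp only [if_pos h5, hsetl]
  · simp only [if_neg h5, hsetl]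
    have hbody : ((l.length : Int) - 2) = ((l.dropLast.length : Int) - 1) := by
      simp [List.length_dropLast]; omega
    rw [hbody, carry_eq l.dropLast ['0']]
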